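-- pv_equiv track=rewrite | github.com/kasaikenta/stab-randomizer | stab-randomizer.py | dot_parity
-- ===== SOURCE A (Python) =====
-- from typing import List, Set, Dict, Tuple, Optional
--
-- def dot_parity(a: Set[int], b: Set[int]) -> int:
--     """
--     Parity of the set intersection: (|a ∩ b| mod 2).
--
--     Parameters
--     ----------
--     a, b : Set[int]
--         Supports of two binary vectors (as sets of indices).
--
--     Returns
--     -------
--     int
--         0 or 1 (parity).
--     """
--     # Iterate over the smaller set for speed
--     if len(a) > len(b):
--         a, b = b, a
--     s = 0
--     for x in a:
--         if x in b:
--             s ^= 1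
--     return s
-- ===== SOURCE B (Python) =====
-- def dot_parity(a, b):
--     # inclusion-exclusion: |a & b| = |a| + |b| - |a | b|; return its parity
--     return (len(a) + len(b) - len(a | b)) & 1
-- ===== Notes on version B (the rewrite author's own statement) =====
-- stated objective: alternative
-- what changed: B computes the parity arithmetically by inclusion-exclusion from the three cardinalities |a|, |b|, |a|b| (building the union), instead of A's membership loop with an XOR accumulator and a size-based swap.
import Mathlib
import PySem

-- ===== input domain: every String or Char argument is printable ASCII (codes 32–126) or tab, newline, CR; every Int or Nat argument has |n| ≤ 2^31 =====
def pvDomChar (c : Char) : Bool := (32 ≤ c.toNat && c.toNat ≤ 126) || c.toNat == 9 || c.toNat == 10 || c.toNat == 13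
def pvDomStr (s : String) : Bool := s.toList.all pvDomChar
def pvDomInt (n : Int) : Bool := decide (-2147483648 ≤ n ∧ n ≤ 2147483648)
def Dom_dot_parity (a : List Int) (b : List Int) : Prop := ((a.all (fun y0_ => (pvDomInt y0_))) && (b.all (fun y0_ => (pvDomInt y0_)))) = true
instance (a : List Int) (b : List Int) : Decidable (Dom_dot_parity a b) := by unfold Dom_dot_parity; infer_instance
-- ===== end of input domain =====

-- B replaces A's membership loop (XOR accumulator, size-based swap) by the
-- inclusion-exclusion formula (|a| + |b| - |a ∪ b|) & 1.

-- ===== PORT A =====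
def dot_parity (a : List Int) (b : List Int) : Int :=
  -- if len(a) > len(b): a, b = b, a
  let p := if a.length > b.length then (b, a) else (a, b)
  -- s = 0; for x in a: if x in b: s ^= 1
  p.1.foldl (fun s x => if PySem.Set.contains p.2 x then PySem.Int.bxor s 1 else s) 0

-- ===== PORT B =====
def dot_parity_alt (a : List Int) (b : List Int) : Int :=
  PySem.Int.band ((a.length : Int) + (b.length : Int) - PySem.Set.len (PySem.Set.union a b)) 1

-- ===== PRECONDITION & SPEC =====
-- The Python parameters are sets; a List Int represents a set only if its elements are
-- distinct, so Pre_ requires both lists duplicate-free (no narrowing of A's domain: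
-- every Python set input corresponds to a nodup list).
def Pre_dot_parity (a : List Int) (b : List Int) : Prop := a.Nodup ∧ b.Nodup
instance (a : List Int) (b : List Int) : Decidable (Pre_dot_parity a b) := by unfold Pre_dot_parity; infer_instance
def pvWitness_dot_parity : List Int × List Int := ([1, 2, 3], [2, 3, 5])
def Spec_dot_parity (a : List Int) (b : List Int) (out : Int) : Prop := out = dot_parity_alt a b
instance (a : List Int) (b : List Int) (out : Int) : Decidable (Spec_dot_parity a b out) := by unfold Spec_dot_parity; infer_instance

-- ===== CLAIM (what is proved, stated in full; the proofs are below) =====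
def Claim_equal_dot_parity : Prop := ∀ (a : List Int) (b : List Int), Dom_dot_parity a b → Pre_dot_parity a b → Spec_dot_parity a b (dot_parity a b)

-- ===== LEMMAS AND PROOFS =====

-- the XOR loop computes the parity of the count of elements satisfying p
lemma pvFoldXor (p : Int → Bool) (l : List Int) : ∀ s : Int, s = 0 ∨ s = 1 →
    l.foldl (fun s x => if p x then PySem.Int.bxor s 1 else s) s
      = PySem.Int.bxor s ((l.countP p % 2 : Nat) : Int) := by
  induction l with
  | nil => intro s _; simp
  | cons x l ih =>
    intro s hs
    simp only [List.foldl_cons, List.countP_cons]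
    by_cases h : p x
    · simp only [if_pos h]
      rw [ih (PySem.Int.bxor s 1)
          (by rcases hs with h1 | h1 <;> subst h1 <;> [right; left] <;> decide)]
      rcases hs with h1 | h1 <;> subst h1 <;>
        rcases Nat.mod_two_eq_zero_or_one (l.countP p) with h2 | h2 <;>
        · rw [Nat.add_mod, h2]; decide
    · simp only [if_neg h, Nat.add_zero]
      exact ih s hs

-- |a ∩ b| is symmetric on duplicate-free lists
lemma pvCountComm (a b : List Int) (ha : a.Nodup) (hb : b.Nodup) :
    a.countP (fun x => b.contains x) = b.countP (fun x => a.contains x) := by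
  rw [List.countP_eq_length_filter, List.countP_eq_length_filter]
  apply List.Perm.length_eq
  rw [List.perm_ext_iff_of_nodup (ha.filter _) (hb.filter _)]
  intro x
  simp only [List.mem_filter, List.contains_iff_mem]
  tauto

-- inclusion-exclusion for the length of the union
lemma pvUnionLen (a b : List Int) (hb : b.Nodup) :
    (PySem.Set.union a b).length + b.countP (fun x => a.contains x)
      = a.length + b.length := by
  have hu : PySem.Set.union a b = PySem.Set.update a b := rfl
  rw [hu, PySem.Set.update_eq_append_filter]
  simp only [PySem.Set.ofList_eq_self_of_nodup b hb]
  rw [List.length_append]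
  have h1 : (b.filter fun y => !PySem.Set.contains a y).length
      = b.countP fun y => !a.contains y := by
    rw [List.countP_eq_length_filter]; rfl
  rw [h1]
  have h2 := List.length_eq_countP_add_countP (p := fun x => a.contains x) (l := b)
  have h3 : List.countP (fun y => !a.contains y) b
      = List.countP (fun y => decide (¬ a.contains y = true)) b := by
    apply List.countP_congr; intro y _; simp
  omega

-- ===== VERDICT (by name: the statement is the Claim_ definition above) =====
theorem dot_parity_spec : Claim_equal_dot_parity := by
  intro a b _ hpre
  obtain ⟨ha, hb⟩ := hpre
  have hB : dot_parity_alt a b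
      = (((b.countP fun x => a.contains x) % 2 : Nat) : Int) := by
    unfold dot_parity_alt
    have hcast : (a.length : Int) + (b.length : Int) - PySem.Set.len (PySem.Set.union a b)
        = ((b.countP fun x => a.contains x : Nat) : Int) := by
      have h := pvUnionLen a b hb
      have hlen : PySem.Set.len (PySem.Set.union a b)
          = ((PySem.Set.union a b).length : Int) := rfl
      rw [hlen]
      omega
    rw [hcast, show (1 : Int) = ((1 : Nat) : Int) from rfl, PySem.Int.band_natCast,
      Nat.and_one_is_mod]
  unfold Spec_dot_parity dot_parity
  rw [hB]
  by_cases h : a.length > b.length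
  · simp only [h, if_pos]
    rw [pvFoldXor _ _ 0 (Or.inl rfl), PySem.Int.bxor_comm, PySem.Int.bxor_zero]
    have : List.countP (fun x => PySem.Set.contains a x) b
        = List.countP (fun x => a.contains x) b := by
      apply List.countP_congr; intro y _; simp
    simp only [this]
  · simp only [h, if_neg, not_false_iff]
    rw [pvFoldXor _ _ 0 (Or.inl rfl), PySem.Int.bxor_comm, PySem.Int.bxor_zero]
    have : List.countP (fun x => PySem.Set.contains b x) a
        = List.countP (fun x => b.contains x) a := by
      apply List.countP_congr; intro y _; simp
    simp only [this]
    rw [pvCountComm a b ha hb]
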